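-- pv_equiv track=rewrite | github.com/qooxzuub/pdfbeaver | src/pdfbeaver/optimization.py | _remove_dead_stores
-- ===== SOURCE A (Python) =====
-- from typing import Any, Dict, List, Optional, Set, Tuple
--
-- def _remove_dead_stores(
--     ops: List[Tuple[List[Any], Any]],
-- ) -> List[Tuple[List[Any], Any]]:
--     """
--     Backward pass: removes operations that set a state which is immediately
--     overwritten without being used.
--     """
--     rev_optimized = []
--     future_overwrites: Set[str] = set()
--
--     for operands, operator in reversed(ops):
--         op_name = str(operator)
--
--         # Barrier: Text operations consume all state
--         if op_name in ["Tj", "TJ", "'", '"']: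
--             future_overwrites.clear()
--             rev_optimized.append((operands, operator))
--             continue
--
--         if _is_dead_store(op_name, future_overwrites):
--             continue
--
--         _update_overwrites(op_name, future_overwrites)
--         rev_optimized.append((operands, operator))
--
--     return list(reversed(rev_optimized))
--
-- def _is_dead_store(op_name: str, future_overwrites: Set[str]) -> bool:
--     """Checks if the current operator is overwritten by a future one."""
--     if op_name == "Tm":
--         return "Tm" in future_overwrites
--     if op_name == "Td":
--         # Td is relative, but if a Tm follows, Td is useless (absolute reset)
--         return "Tm" in future_overwrites
--     if op_name == "Tz":
--         return "Tz" in future_overwrites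
--     if op_name == "Tf":
--         return "Tf" in future_overwrites
--     return False
--
-- def _update_overwrites(op_name: str, future_overwrites: Set[str]):
--     """Updates the set of overwritten states based on the current operator."""
--     if op_name == "Tm":
--         future_overwrites.add("Tm")
--         future_overwrites.add("Td")  # Tm resets translation too
--     elif op_name == "Tz":
--         future_overwrites.add("Tz")
--     elif op_name == "Tf":
--         future_overwrites.add("Tf")
-- ===== SOURCE B (Python) =====
-- from typing import Any, List, Tuple
--
-- _BARRIERS = ("Tj", "TJ", "'", '"')
-- _TRACKED = ("Tm", "Tz", "Tf")
--
-- def _remove_dead_stores(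
--     ops: List[Tuple[List[Any], Any]],
-- ) -> List[Tuple[List[Any], Any]]:
--     """Forward pass over barrier-delimited segments with occurrence counters."""
--     out: List[Tuple[List[Any], Any]] = []
--     i = 0
--     n = len(ops)
--     while i < n:
--         # find end of the current segment (next barrier, or end of list)
--         j = i
--         while j < n and str(ops[j][1]) not in _BARRIERS:
--             j += 1
--         seg = ops[i:j]
--         # count occurrences of the tracked state setters within the segment
--         counts = {"Tm": 0, "Tz": 0, "Tf": 0}
--         for _, operator in seg:
--             name = str(operator)
--             if name in counts:
--                 counts[name] += 1
--         # emit in order: a tracked setter survives only as the last of its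
--         # kind; a Td survives only if no Tm remains after it
--         for operands, operator in seg:
--             name = str(operator)
--             if name in counts:
--                 counts[name] -= 1
--                 if counts[name] == 0:
--                     out.append((operands, operator))
--             elif name == "Td":
--                 if counts["Tm"] == 0:
--                     out.append((operands, operator))
--             else:
--                 out.append((operands, operator))
--         if j < n:
--             out.append(ops[j])  # the barrier itself is always kept
--         i = j + 1
--     return out
-- ===== Notes on version B (the rewrite author's own statement) =====
-- stated objective: alternative
-- what changed: Replaced the backward pass with a future-overwrites set by a forward pass over barrier-delimited segments: per segment one counting scan of Tm/Tz/Tf occurrences, then one emitting scan that keeps a tracked setter only when it is the last of its kind and a Td only when no Tm remains after it.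
import Mathlib
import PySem

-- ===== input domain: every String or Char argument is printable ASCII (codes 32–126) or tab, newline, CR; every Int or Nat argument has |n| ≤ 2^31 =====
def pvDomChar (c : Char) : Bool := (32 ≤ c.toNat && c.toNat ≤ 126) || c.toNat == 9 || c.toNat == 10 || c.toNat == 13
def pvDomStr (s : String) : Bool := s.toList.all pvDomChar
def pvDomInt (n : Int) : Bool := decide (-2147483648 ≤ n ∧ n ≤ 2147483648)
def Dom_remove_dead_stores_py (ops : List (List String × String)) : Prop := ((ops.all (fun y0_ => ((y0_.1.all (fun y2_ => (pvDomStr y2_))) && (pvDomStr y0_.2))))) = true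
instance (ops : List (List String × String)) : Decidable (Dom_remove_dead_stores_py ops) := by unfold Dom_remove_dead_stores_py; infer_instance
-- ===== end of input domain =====

-- B replaces A's backward dead-store pass by a forward, segment-wise pass with occurrence counters (alternative decomposition, same result).


-- ===== PORT A =====

-- _is_dead_store(op_name, future_overwrites)
def pvIsDead (opName : String) (fut : PySem.Set String) : Bool :=
  if opName == "Tm" then PySem.Set.contains fut "Tm"
  else if opName == "Td" then PySem.Set.contains fut "Tm"
  else if opName == "Tz" then PySem.Set.contains fut "Tz"
  else if opName == "Tf" then PySem.Set.contains fut "Tf"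
  else false

-- _update_overwrites(op_name, future_overwrites)
def pvUpdateOverwrites (opName : String) (fut : PySem.Set String) : PySem.Set String :=
  if opName == "Tm" then PySem.Set.add (PySem.Set.add fut "Tm") "Td"
  else if opName == "Tz" then PySem.Set.add fut "Tz"
  else if opName == "Tf" then PySem.Set.add fut "Tf"
  else fut

-- one iteration of A's loop body over the state (rev_optimized, future_overwrites);
-- operator is already a String here, so str(operator) is the operator itself
def pvAStep (st : List (List String × String) × PySem.Set String)
    (op : List String × String) : List (List String × String) × PySem.Set String :=
  let opName := op.2
  if opName == "Tj" || opName == "TJ" || opName == "'" || opName == "\"" then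
    (st.1 ++ [op], PySem.Set.empty)
  else if pvIsDead opName st.2 then st
  else (st.1 ++ [op], pvUpdateOverwrites opName st.2)

def remove_dead_stores_py (ops : List (List String × String)) : List (List String × String) :=
  ((ops.reverse.foldl pvAStep ([], PySem.Set.empty)).1).reverse

-- ===== PORT B =====

def pvIsBarrier (name : String) : Bool :=
  name == "Tj" || name == "TJ" || name == "'" || name == "\""

-- inner while loop of Source B: advance j to the next barrier; returns (segment ops[i:j], ops[j:])
def pvSplitSeg : List (List String × String) →
    List (List String × String) × List (List String × String)
  | [] => ([], [])
  | op :: rest =>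
    if pvIsBarrier op.2 then ([], op :: rest)
    else
      let (seg, r) := pvSplitSeg rest
      (op :: seg, r)

-- body of Source B's counting loop: the counts dict {"Tm","Tz","Tf"} as a triple
def pvCStep (c : Int × Int × Int) (op : List String × String) : Int × Int × Int :=
  if op.2 == "Tm" then (c.1 + 1, c.2.1, c.2.2)
  else if op.2 == "Tz" then (c.1, c.2.1 + 1, c.2.2)
  else if op.2 == "Tf" then (c.1, c.2.1, c.2.2 + 1)
  else c

def pvCounts (seg : List (List String × String)) : Int × Int × Int :=
  seg.foldl pvCStep (0, 0, 0)

-- emitting scan of Source B: decrement the counter of a tracked setter and keep it iff it hits 0;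
-- keep a Td iff the remaining Tm count is 0; keep anything else
def pvEmit : Int × Int × Int → List (List String × String) → List (List String × String)
  | _, [] => []
  | (tm, tz, tf), op :: rest =>
    if op.2 == "Tm" then
      (if tm - 1 == 0 then [op] else []) ++ pvEmit (tm - 1, tz, tf) rest
    else if op.2 == "Tz" then
      (if tz - 1 == 0 then [op] else []) ++ pvEmit (tm, tz - 1, tf) rest
    else if op.2 == "Tf" then
      (if tf - 1 == 0 then [op] else []) ++ pvEmit (tm, tz, tf - 1) rest
    else if op.2 == "Td" then
      (if tm == 0 then [op] else []) ++ pvEmit (tm, tz, tf) rest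
    else op :: pvEmit (tm, tz, tf) rest

-- termination helper for the outer while loop (the rest after a split is no longer than the input)
theorem pvSplitSeg_snd_len (ops : List (List String × String)) :
    (pvSplitSeg ops).2.length ≤ ops.length := by
  induction ops with
  | nil => simp [pvSplitSeg]
  | cons op rest ih =>
    simp only [pvSplitSeg]
    split
    · simp
    · simpa using Nat.le_succ_of_le ih

-- outer while loop of Source B: process one barrier-delimited segment, then the barrier, then recurse
def remove_dead_stores_py_alt (ops : List (List String × String)) : List (List String × String) :=
  match h : pvSplitSeg ops with
  | (seg, []) => pvEmit (pvCounts seg) seg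
  | (seg, bar :: rest') => pvEmit (pvCounts seg) seg ++ bar :: remove_dead_stores_py_alt rest'
termination_by ops.length
decreasing_by
  have hle := pvSplitSeg_snd_len ops
  rw [h] at hle
  simp at hle
  omega

-- ===== PRECONDITION & SPEC =====
def Spec_remove_dead_stores_py (ops : List (List String × String)) (out : List (List String × String)) : Prop := out = remove_dead_stores_py_alt ops
instance (ops : List (List String × String)) (out : List (List String × String)) : Decidable (Spec_remove_dead_stores_py ops out) := by unfold Spec_remove_dead_stores_py; infer_instance

-- ===== CLAIM (what is proved, stated in full; the proofs are below) =====
def Claim_equal_remove_dead_stores_py : Prop := ∀ (ops : List (List String × String)), Dom_remove_dead_stores_py ops → Spec_remove_dead_stores_py ops (remove_dead_stores_py ops)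

-- ===== LEMMAS AND PROOFS =====

-- common reference recursion: keep a barrier; drop a Tm/Td when a Tm occurs later in the
-- current segment, a Tz (Tf) when a Tz (Tf) occurs later in it; keep anything else
def pvSegAny (name : String) (ops : List (List String × String)) : Bool :=
  (ops.takeWhile (fun op => !pvIsBarrier op.2)).any (fun op => op.2 == name)

def pvRef : List (List String × String) → List (List String × String)
  | [] => []
  | op :: rest =>
    if pvIsBarrier op.2 then op :: pvRef rest
    else if op.2 == "Tm" then (if pvSegAny "Tm" rest then pvRef rest else op :: pvRef rest)
    else if op.2 == "Td" then (if pvSegAny "Tm" rest then pvRef rest else op :: pvRef rest)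
    else if op.2 == "Tz" then (if pvSegAny "Tz" rest then pvRef rest else op :: pvRef rest)
    else if op.2 == "Tf" then (if pvSegAny "Tf" rest then pvRef rest else op :: pvRef rest)
    else op :: pvRef rest

-- ---------- A-side lemmas ----------

def pvF (ops : List (List String × String)) :
    List (List String × String) × PySem.Set String :=
  ops.reverse.foldl pvAStep ([], PySem.Set.empty)

theorem pvF_cons (op : List String × String) (rest : List (List String × String)) :
    pvF (op :: rest) = pvAStep (pvF rest) op := by
  simp [pvF, List.reverse_cons, List.foldl_append]

theorem pvSegAny_cons (name : String) (op : List String × String)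
    (rest : List (List String × String)) :
    pvSegAny name (op :: rest) =
      if pvIsBarrier op.2 then false else ((op.2 == name) || pvSegAny name rest) := by
  by_cases hb : pvIsBarrier op.2 <;> simp [pvSegAny, List.takeWhile, hb]

theorem pvAStep_mem (st : List (List String × String) × PySem.Set String)
    (op : List String × String) (name : String)
    (hn : name = "Tm" ∨ name = "Tz" ∨ name = "Tf")
    (hb : pvIsBarrier op.2 = false) :
    (name ∈ (pvAStep st op).2 ↔ (name ∈ st.2 ∨ op.2 = name)) := by
  simp only [pvAStep, pvIsBarrier] at *
  rw [if_neg (by simp_all)]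
  by_cases h1 : op.2 = "Tm" <;> by_cases h2 : op.2 = "Td" <;> by_cases h3 : op.2 = "Tz" <;>
    by_cases h4 : op.2 = "Tf" <;>
    rcases hn with hn | hn | hn <;>
    simp_all [pvIsDead, pvUpdateOverwrites, PySem.Set.mem_add,
      PySem.Set.contains_eq_listContains] <;>
    (try split) <;> simp_all [PySem.Set.mem_add]

theorem pvF_mem (ops : List (List String × String)) (name : String)
    (hn : name = "Tm" ∨ name = "Tz" ∨ name = "Tf") :
    (name ∈ (pvF ops).2 ↔ pvSegAny name ops = true) := by
  induction ops with
  | nil => simp [pvF, pvSegAny, PySem.Set.empty]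
  | cons op rest ih =>
    rw [pvF_cons, pvSegAny_cons]
    by_cases hb : pvIsBarrier op.2
    · have hb' : (op.2 == "Tj" || op.2 == "TJ" || op.2 == "'" || op.2 == "\"") = true := hb
      simp [pvAStep, hb', PySem.Set.empty, hb]
    · rw [pvAStep_mem _ _ _ hn (by simpa using hb)]
      simp [hb, ih, or_comm]

-- pvIsDead on A's running set, expressed through the reference's segment predicate
theorem pvIsDead_pvF (op : List String × String) (rest : List (List String × String)) :
    pvIsDead op.2 (pvF rest).2 =
      (if op.2 == "Tm" then pvSegAny "Tm" rest
       else if op.2 == "Td" then pvSegAny "Tm" rest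
       else if op.2 == "Tz" then pvSegAny "Tz" rest
       else if op.2 == "Tf" then pvSegAny "Tf" rest
       else false) := by
  have hTm := pvF_mem rest "Tm" (by simp)
  have hTz := pvF_mem rest "Tz" (by simp)
  have hTf := pvF_mem rest "Tf" (by simp)
  simp only [pvIsDead, PySem.Set.contains_eq_listContains, List.contains_eq_mem]
  split_ifs <;> simp_all

theorem A_eq_ref (ops : List (List String × String)) :
    remove_dead_stores_py ops = pvRef ops := by
  induction ops with
  | nil => rfl
  | cons op rest ih =>
    show ((pvF (op :: rest)).1).reverse = _
    rw [pvF_cons]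
    by_cases hb : pvIsBarrier op.2
    · have hb' : (op.2 == "Tj" || op.2 == "TJ" || op.2 == "'" || op.2 == "\"") = true := hb
      simp only [pvAStep, hb', if_pos, pvRef, hb, if_true]
      simpa using ih
    · have hb' : (op.2 == "Tj" || op.2 == "TJ" || op.2 == "'" || op.2 == "\"") = false := by
        simpa [pvIsBarrier] using hb
      simp only [pvAStep, hb', Bool.false_eq_true, if_false, pvIsDead_pvF]
      simp only [pvRef, hb, Bool.false_eq_true, if_false]
      by_cases h1 : op.2 = "Tm" <;> by_cases h2 : op.2 = "Td" <;> by_cases h3 : op.2 = "Tz" <;>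
        by_cases h4 : op.2 = "Tf" <;>
        simp_all [remove_dead_stores_py, pvF] <;>
        (try (split <;> simp_all [remove_dead_stores_py, pvF]))

-- ---------- B-side lemmas ----------

theorem pvSplitSeg_eq (ops : List (List String × String)) :
    pvSplitSeg ops = (ops.takeWhile (fun op => !pvIsBarrier op.2),
                      ops.dropWhile (fun op => !pvIsBarrier op.2)) := by
  induction ops with
  | nil => rfl
  | cons op rest ih =>
    by_cases hb : pvIsBarrier op.2 <;>
      simp [pvSplitSeg, List.takeWhile, List.dropWhile, hb, ih]

theorem pvCounts_shift (seg : List (List String × String)) (c : Int × Int × Int) :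
    seg.foldl pvCStep c =
      (c.1 + (pvCounts seg).1, c.2.1 + (pvCounts seg).2.1, c.2.2 + (pvCounts seg).2.2) := by
  induction seg generalizing c with
  | nil => simp [pvCounts]
  | cons x seg ih =>
    simp only [List.foldl_cons]
    rw [ih (pvCStep c x)]
    have h2 : pvCounts (x :: seg) =
        ((pvCStep (0,0,0) x).1 + (pvCounts seg).1,
         (pvCStep (0,0,0) x).2.1 + (pvCounts seg).2.1,
         (pvCStep (0,0,0) x).2.2 + (pvCounts seg).2.2) := by
      simp only [pvCounts, List.foldl_cons]
      rw [ih (pvCStep (0,0,0) x)]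
      rfl
    rw [h2]
    simp only [pvCStep]
    split_ifs <;> simp <;> ring

theorem pvCounts_fst (seg : List (List String × String)) :
    (pvCounts seg).1 = (seg.countP (fun op => op.2 == "Tm") : Int) := by
  induction seg with
  | nil => rfl
  | cons x seg ih =>
    have := pvCounts_shift seg (pvCStep (0,0,0) x)
    simp only [pvCounts, List.foldl_cons] at *
    rw [this, List.countP_cons]
    simp only [pvCStep]
    by_cases h1 : x.2 = "Tm" <;>
      simp_all <;> (try split_ifs) <;> (try simp_all) <;> omega

theorem pvCounts_tz (seg : List (List String × String)) :
    (pvCounts seg).2.1 = (seg.countP (fun op => op.2 == "Tz") : Int) := by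
  induction seg with
  | nil => rfl
  | cons x seg ih =>
    have := pvCounts_shift seg (pvCStep (0,0,0) x)
    simp only [pvCounts, List.foldl_cons] at *
    rw [this, List.countP_cons]
    simp only [pvCStep]
    by_cases h1 : x.2 = "Tz" <;>
      simp_all <;> (try split_ifs) <;> (try simp_all) <;> omega

theorem pvCounts_tf (seg : List (List String × String)) :
    (pvCounts seg).2.2 = (seg.countP (fun op => op.2 == "Tf") : Int) := by
  induction seg with
  | nil => rfl
  | cons x seg ih =>
    have := pvCounts_shift seg (pvCStep (0,0,0) x)
    simp only [pvCounts, List.foldl_cons] at *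
    rw [this, List.countP_cons]
    simp only [pvCStep]
    by_cases h1 : x.2 = "Tf" <;>
      simp_all <;> (try split_ifs) <;> (try simp_all) <;> omega

theorem countP_int_zero_iff (seg : List (List String × String))
    (p : List String × String → Bool) :
    (((seg.countP p : Nat) : Int) = 0) ↔ seg.any p = false := by
  constructor
  · intro h
    rcases hb : seg.any p with _ | _
    · rfl
    · exfalso
      rw [List.any_eq_true] at hb
      have := List.countP_pos_iff.mpr hb
      omega
  · intro h
    rw [List.any_eq_false] at h
    have h0 : seg.countP p = 0 := List.countP_eq_zero.mpr (by simpa using h)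
    omega

theorem counts_tm_zero_iff (seg : List (List String × String)) :
    ((pvCounts seg).1 = 0) ↔ seg.any (fun op => op.2 == "Tm") = false := by
  rw [pvCounts_fst]; exact countP_int_zero_iff seg _

theorem counts_tz_zero_iff (seg : List (List String × String)) :
    ((pvCounts seg).2.1 = 0) ↔ seg.any (fun op => op.2 == "Tz") = false := by
  rw [pvCounts_tz]; exact countP_int_zero_iff seg _

theorem counts_tf_zero_iff (seg : List (List String × String)) :
    ((pvCounts seg).2.2 = 0) ↔ seg.any (fun op => op.2 == "Tf") = false := by
  rw [pvCounts_tf]; exact countP_int_zero_iff seg _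

-- what the emitting scan does with the head of a segment
def pvEmitHead (op : List String × String) (seg : List (List String × String)) :
    List (List String × String) :=
  if op.2 == "Tm" then (if (pvCounts seg).1 == 0 then [op] else [])
  else if op.2 == "Tz" then (if (pvCounts seg).2.1 == 0 then [op] else [])
  else if op.2 == "Tf" then (if (pvCounts seg).2.2 == 0 then [op] else [])
  else if op.2 == "Td" then (if (pvCounts seg).1 == 0 then [op] else [])
  else [op]

theorem pvCounts_cons (op : List String × String) (seg : List (List String × String)) :
    pvCounts (op :: seg) =
      ((pvCStep (0,0,0) op).1 + (pvCounts seg).1,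
       (pvCStep (0,0,0) op).2.1 + (pvCounts seg).2.1,
       (pvCStep (0,0,0) op).2.2 + (pvCounts seg).2.2) := by
  simp only [pvCounts, List.foldl_cons]
  rw [pvCounts_shift seg (pvCStep (0,0,0) op)]
  rfl

theorem pvEmit_cons (op : List String × String) (seg : List (List String × String)) :
    pvEmit (pvCounts (op :: seg)) (op :: seg) =
      pvEmitHead op seg ++ pvEmit (pvCounts seg) seg := by
  rw [pvCounts_cons]
  by_cases h1 : op.2 = "Tm" <;> by_cases h2 : op.2 = "Tz" <;> by_cases h3 : op.2 = "Tf" <;>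
    by_cases h4 : op.2 = "Td" <;>
    simp_all [pvEmit, pvEmitHead, pvCStep]

theorem alt_unfold (ops : List (List String × String)) :
    remove_dead_stores_py_alt ops =
      pvEmit (pvCounts (pvSplitSeg ops).1) (pvSplitSeg ops).1 ++
        (match (pvSplitSeg ops).2 with
         | [] => []
         | bar :: rest' => bar :: remove_dead_stores_py_alt rest') := by
  conv_lhs => rw [remove_dead_stores_py_alt.eq_def]
  split
  · rename_i seg heq
    rw [heq]
    simp [pvCounts]
  · rename_i seg bar rest' heq
    rw [heq]

theorem alt_cons_bar (op : List String × String) (rest : List (List String × String))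
    (hb : pvIsBarrier op.2 = true) :
    remove_dead_stores_py_alt (op :: rest) = op :: remove_dead_stores_py_alt rest := by
  have hs : pvSplitSeg (op :: rest) = ([], op :: rest) := by simp [pvSplitSeg, hb]
  rw [alt_unfold (op :: rest), hs]
  simp [pvCounts, pvEmit, alt_unfold rest]

theorem alt_cons_nonbar (op : List String × String) (rest : List (List String × String))
    (hb : pvIsBarrier op.2 = false) :
    remove_dead_stores_py_alt (op :: rest) =
      pvEmitHead op (pvSplitSeg rest).1 ++ remove_dead_stores_py_alt rest := by
  have hs : pvSplitSeg (op :: rest) = (op :: (pvSplitSeg rest).1, (pvSplitSeg rest).2) := by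
    simp [pvSplitSeg, hb]
  rw [alt_unfold (op :: rest), hs, alt_unfold rest]
  rw [pvEmit_cons]
  simp [List.append_assoc]

theorem B_eq_ref (ops : List (List String × String)) :
    remove_dead_stores_py_alt ops = pvRef ops := by
  induction ops with
  | nil =>
    rw [alt_unfold]
    simp [pvSplitSeg, pvCounts, pvEmit, pvRef]
  | cons op rest ih =>
    by_cases hb : pvIsBarrier op.2
    · rw [alt_cons_bar _ _ hb, ih]
      simp [pvRef, hb]
    · have hb' : pvIsBarrier op.2 = false := by simpa using hb
      rw [alt_cons_nonbar _ _ hb', ih]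
      have h1 : (pvSplitSeg rest).1 = rest.takeWhile (fun op => !pvIsBarrier op.2) := by
        rw [pvSplitSeg_eq]
      simp only [pvRef, hb', Bool.false_eq_true, if_false]
      by_cases c1 : op.2 = "Tm" <;> by_cases c2 : op.2 = "Td" <;> by_cases c3 : op.2 = "Tz" <;>
        by_cases c4 : op.2 = "Tf" <;>
        simp_all [pvEmitHead, counts_tm_zero_iff, counts_tz_zero_iff, counts_tf_zero_iff, pvSegAny, h1] <;>
        (try (split <;> simp_all [counts_tm_zero_iff, counts_tz_zero_iff, counts_tf_zero_iff, pvSegAny, h1])) <;>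
        (try aesop)

-- ===== VERDICT (by name: the statement is the Claim_ definition above) =====
theorem remove_dead_stores_py_spec : Claim_equal_remove_dead_stores_py := by
  intro ops _
  unfold Spec_remove_dead_stores_py
  rw [A_eq_ref, B_eq_ref]
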